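-- pv_equiv track=rewrite | github.com/wizardrl/matematicaDiscreta | producto3v1.py | accepts_product_afds
-- ===== SOURCE A (Python) =====
-- def accepts_product_afds(s: str) -> bool:
--     # estado de "contains 011" por DFA de 4 estados
--     state_sub = 0  # 0=q0,1=q1,2=q2,3=q3 (acept)
--     # estado de "ends in 0"
--     state_last = None  # None = cadena vacía (no acepta), 0 = last was 0, 1 = last was 1
--
--     for ch in s:
--         # actualizar sub-automata
--         if state_sub == 0:
--             if ch == '0': state_sub = 1
--             else: state_sub = 0
--         elif state_sub == 1:
--             if ch == '0': state_sub = 1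
--             else: state_sub = 2
--         elif state_sub == 2:
--             if ch == '0': state_sub = 3  # we have seen 011? careful: we need correct mapping:
--                 # Actually transitions below are adjusted to detect 011: from q2 on '1' -> q3? No.
--                 # Simpler: implement direct pattern automaton:
--             # we'll replace this by direct safe automaton below
--             pass
--         elif state_sub == 3:
--             state_sub = 3
--
--         # actualizar ends_in_0
--         if ch == '0':
--             state_last = 0
--         else:
--             state_last = 1
--
--     # Final check using simple substring detection
--     return ('011' in s) and (state_last == 0)
-- ===== SOURCE B (Python) =====
-- def accepts_product_afds(s: str) -> bool:
--     # Single-pass product DFA: pattern-progress state for '011' plus a last-char-is-'0' flag.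
--     p = 0  # 0=start, 1=seen '0', 2=seen '01', 3='011' found (sink)
--     last_zero = False
--     for ch in s:
--         if p != 3:
--             if ch == '0':
--                 p = 1
--             elif ch == '1':
--                 if p == 2:
--                     p = 3
--                 elif p == 1:
--                     p = 2
--                 else:
--                     p = 0
--             else:
--                 p = 0
--         last_zero = (ch == '0')
--     return p == 3 and last_zero
-- ===== Notes on version B (the rewrite author's own statement) =====
-- stated objective: alternative
-- what changed: B decides both properties in one pass with a product DFA (a 4-state '011'-pattern automaton plus a last-char flag), instead of A's dead-code loop followed by a substring scan ('011' in s) and a last-character state check.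
import Mathlib
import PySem

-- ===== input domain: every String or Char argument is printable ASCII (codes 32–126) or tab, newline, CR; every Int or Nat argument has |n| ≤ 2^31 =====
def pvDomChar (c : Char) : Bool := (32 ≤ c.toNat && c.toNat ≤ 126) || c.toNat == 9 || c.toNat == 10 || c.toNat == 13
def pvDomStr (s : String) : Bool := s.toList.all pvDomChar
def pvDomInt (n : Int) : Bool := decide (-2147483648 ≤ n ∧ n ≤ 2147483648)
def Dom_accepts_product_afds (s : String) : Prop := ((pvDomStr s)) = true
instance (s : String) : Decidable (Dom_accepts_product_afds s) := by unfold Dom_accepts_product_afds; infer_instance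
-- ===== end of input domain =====

-- B replaces A's dead-code loop + substring scan by a single-pass product DFA; objective: alternative (same O(n) cost).

-- ===== PORT A =====
-- one loop step of A: updates the (dead) state_sub exactly as A's branch chain does, and state_last
def pvStepA (st : Int × Option Int) (ch : Char) : Int × Option Int :=
  let sub :=
    if st.1 == 0 then (if ch == '0' then 1 else 0)
    else if st.1 == 1 then (if ch == '0' then 1 else 2)
    else if st.1 == 2 then (if ch == '0' then 3 else st.1)   -- Python: only the 'if' assigns; else falls through ('pass')
    else if st.1 == 3 then 3
    else st.1
  let last : Option Int := if ch == '0' then some 0 else some 1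
  (sub, last)

def accepts_product_afds (s : String) : Bool :=
  let st := s.toList.foldl pvStepA (0, none)
  PySem.Str.isIn "011" s && (st.2 == some (0 : Int))

-- ===== PORT B =====
-- pattern-progress transition for '011' (Source B's branch chain)
def pvStepP (p : Nat) (ch : Char) : Nat :=
  if p == 3 then 3
  else if ch == '0' then 1
  else if ch == '1' then (if p == 2 then 3 else if p == 1 then 2 else 0)
  else 0

def pvStepB (st : Nat × Bool) (ch : Char) : Nat × Bool := (pvStepP st.1 ch, ch == '0')

def accepts_product_afds_alt (s : String) : Bool :=
  let st := s.toList.foldl pvStepB (0, false)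
  st.1 == 3 && st.2

-- ===== PRECONDITION & SPEC =====
def Spec_accepts_product_afds (s : String) (out : Bool) : Prop := out = accepts_product_afds_alt s
instance (s : String) (out : Bool) : Decidable (Spec_accepts_product_afds s out) := by unfold Spec_accepts_product_afds; infer_instance

-- ===== CLAIM (what is proved, stated in full; the proofs are below) =====
def Claim_equal_accepts_product_afds : Prop := ∀ (s : String), Dom_accepts_product_afds s → Spec_accepts_product_afds s (accepts_product_afds s)

-- ===== LEMMAS AND PROOFS =====

-- the DFA state after reading l, characterised on the REVERSED word
def pvSpecR (r : List Char) : Nat :=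
  if ['1','1','0'] <:+: r then 3
  else if ['1','0'] <+: r then 2
  else if ['0'] <+: r then 1
  else 0

lemma pv_infix_cons_pat (r : List Char) (c : Char) :
    (['1','1','0'] <:+: c :: r) ↔ (c = '1' ∧ ['1','0'] <+: r) ∨ ['1','1','0'] <:+: r := by
  rw [List.infix_cons_iff, List.cons_prefix_cons]
  tauto

lemma pv_prefix2_cons (r : List Char) (c : Char) :
    (['1','0'] <+: c :: r) ↔ (c = '1' ∧ ['0'] <+: r) := by
  rw [List.cons_prefix_cons]
  tauto

lemma pv_prefix1_cons (r : List Char) (c : Char) :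
    (['0'] <+: c :: r) ↔ c = '0' := by
  rw [List.cons_prefix_cons]
  simp [eq_comm]

lemma pvStepP_spec (r : List Char) (c : Char) : pvStepP (pvSpecR r) c = pvSpecR (c :: r) := by
  by_cases hI : ['1','1','0'] <:+: r
  · have hI' : ['1','1','0'] <:+: c :: r := (pv_infix_cons_pat r c).mpr (Or.inr hI)
    simp [pvSpecR, pvStepP, hI, hI']
  · by_cases hc0 : c = '0'
    · subst hc0
      have h1 : ¬ (['1','1','0'] <:+: '0' :: r) := by
        rw [pv_infix_cons_pat]; rintro (⟨h, _⟩ | h) <;> simp_all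
      have h2 : ¬ (['1','0'] <+: '0' :: r) := by
        rw [pv_prefix2_cons]; rintro ⟨h, _⟩; simp_all
      simp only [pvSpecR, pvStepP, hI, h1, h2, pv_prefix1_cons, if_false, if_true]
      split_ifs <;> simp_all
    · by_cases hc1 : c = '1'
      · subst hc1
        by_cases hP2 : ['1','0'] <+: r
        · have hI' : ['1','1','0'] <:+: '1' :: r :=
            (pv_infix_cons_pat r '1').mpr (Or.inl ⟨rfl, hP2⟩)
          simp [pvSpecR, pvStepP, hI, hP2, hI']
        · have h1 : ¬ (['1','1','0'] <:+: '1' :: r) := by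
            rw [pv_infix_cons_pat]; rintro (⟨_, h⟩ | h) <;> simp_all
          by_cases hP1 : ['0'] <+: r
          · have h2 : ['1','0'] <+: '1' :: r := (pv_prefix2_cons r '1').mpr ⟨rfl, hP1⟩
            simp [pvSpecR, pvStepP, hI, hP2, hP1, h1, h2]
          · have h2 : ¬ (['1','0'] <+: '1' :: r) := by
              rw [pv_prefix2_cons]; rintro ⟨_, h⟩; exact hP1 h
            simp [pvSpecR, pvStepP, hI, hP2, hP1, h1, h2]
      · have h1 : ¬ (['1','1','0'] <:+: c :: r) := by
          rw [pv_infix_cons_pat]; rintro (⟨h, _⟩ | h) <;> simp_all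
        have h2 : ¬ (['1','0'] <+: c :: r) := by
          rw [pv_prefix2_cons]; rintro ⟨h, _⟩; exact hc1 h
        have h3 : ¬ (['0'] <+: c :: r) := by rw [pv_prefix1_cons]; exact hc0
        simp only [pvSpecR, pvStepP, hI, h1, h2, h3, if_false]
        split_ifs <;> simp_all

lemma pv_fst_foldB : ∀ (l : List Char) (p : Nat) (lz : Bool),
    (l.foldl pvStepB (p, lz)).1 = l.foldl pvStepP p := by
  intro l
  induction l with
  | nil => intro p lz; rfl
  | cons c t ih => intro p lz; simp [List.foldl, pvStepB, ih]

lemma pv_foldP_spec : ∀ (l : List Char), l.foldl pvStepP 0 = pvSpecR l.reverse := by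
  intro l
  induction l using List.reverseRecOn with
  | nil => rfl
  | append_singleton t c ih =>
      rw [List.foldl_append]
      simp only [List.foldl, List.reverse_append, List.reverse_singleton, List.singleton_append]
      rw [ih, pvStepP_spec]

lemma pvSpecR_eq_three (r : List Char) : (pvSpecR r == 3) = decide (['1','1','0'] <:+: r) := by
  unfold pvSpecR
  split_ifs with h1 h2 h3 <;> simp_all

lemma pv_snd_foldB (l : List Char) (c : Char) (st : Nat × Bool) :
    ((l ++ [c]).foldl pvStepB st).2 = (c == '0') := by
  rw [List.foldl_append]; rfl

lemma pv_snd_foldA (l : List Char) (c : Char) (st : Int × Option Int) :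
    ((l ++ [c]).foldl pvStepA st).2 = (if c == '0' then some (0 : Int) else some 1) := by
  rw [List.foldl_append]; rfl

lemma pv_isIn_eq (s : String) :
    PySem.Str.isIn "011" s = decide (['0','1','1'] <:+: s.toList) := by
  by_cases h : ['0','1','1'] <:+: s.toList
  · simp [h]
    exact (PySem.Chars.isIn_iff_infix _ _).mpr h
  · simp [h]
    exact (PySem.Chars.isIn_eq_false_iff _ _).mpr h

lemma pv_infix_reverse (l : List Char) :
    (['1','1','0'] <:+: l.reverse) ↔ (['0','1','1'] <:+: l) := by
  constructor
  · intro h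
    have := h.reverse
    simpa using this
  · intro h
    have := h.reverse
    simpa using this

-- ===== VERDICT (by name: the statement is the Claim_ definition above) =====
theorem accepts_product_afds_spec : Claim_equal_accepts_product_afds := by
  intro s _
  unfold Spec_accepts_product_afds accepts_product_afds accepts_product_afds_alt
  simp only []
  rw [pv_fst_foldB, pv_foldP_spec, pvSpecR_eq_three, pv_isIn_eq]
  have hfst : decide (['0','1','1'] <:+: s.toList) = decide (['1','1','0'] <:+: s.toList.reverse) := by
    by_cases h : ['0','1','1'] <:+: s.toList <;> simp [h, pv_infix_reverse]
  rw [hfst]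
  congr 1
  induction s.toList using List.reverseRecOn with
  | nil => rfl
  | append_singleton t c _ =>
      rw [pv_snd_foldB, pv_snd_foldA]
      by_cases h : c = '0' <;> simp [h]
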